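-- pv_equiv track=rewrite | github.com/seiya592/atcoder | 001_AtCoder_ Beginner_Contest/005_ABC_201_250/abc247/247e/247e.py | f
-- ===== SOURCE A (Python) =====
-- def f(lst):
--     c = 1
--     ret = 0
--     for b in lst:
--         if b:
--             c += 1
--         else:
--             ret += (c * (c-1)) // 2
--             c = 1
--     else:
--         ret += (c * (c - 1)) // 2
--     return ret
-- ===== SOURCE B (Python) =====
-- def f(lst):
--     run = 0
--     total = 0
--     for b in lst:
--         run = run + 1 if b else 0
--         total += run
--     return total
-- ===== Notes on version B (the rewrite author's own statement) =====
-- stated objective: simpler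
-- what changed: Replaces the per-run closed-form c*(c-1)//2 flushed at false boundaries (and the final for-else flush) with an incremental sum: a running run-length added to the total at every element, counting all-True subarrays ending at each position.
import Mathlib
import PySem

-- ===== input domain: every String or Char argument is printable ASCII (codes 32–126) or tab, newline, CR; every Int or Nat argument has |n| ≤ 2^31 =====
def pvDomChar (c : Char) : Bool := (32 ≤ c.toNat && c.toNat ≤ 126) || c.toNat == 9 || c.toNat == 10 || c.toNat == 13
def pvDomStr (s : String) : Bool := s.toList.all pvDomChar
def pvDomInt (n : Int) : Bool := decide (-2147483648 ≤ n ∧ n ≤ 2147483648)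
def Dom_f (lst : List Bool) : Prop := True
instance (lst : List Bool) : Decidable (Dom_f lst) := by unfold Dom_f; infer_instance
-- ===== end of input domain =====

-- B replaces A's closed-form flush c*(c-1)//2 at false boundaries with an incremental
-- per-element sum of the running run length (simpler decomposition, same O(n) cost).


-- ===== PORT A =====
-- A's loop body: on True increment c; on False flush c*(c-1)//2 into ret and reset c to 1.
def stepA (s : Int × Int) (b : Bool) : Int × Int :=
  if b then (s.1 + 1, s.2) else (1, s.2 + PySem.Int.floordiv (s.1 * (s.1 - 1)) 2)

def f (lst : List Bool) : Int :=
  let s := lst.foldl stepA (1, 0)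
  s.2 + PySem.Int.floordiv (s.1 * (s.1 - 1)) 2

-- ===== PORT B =====
-- B's loop body: run = run+1 if b else 0; total += run.
def stepB (s : Int × Int) (b : Bool) : Int × Int :=
  let run := if b then s.1 + 1 else 0
  (run, s.2 + run)

def f_alt (lst : List Bool) : Int :=
  (lst.foldl stepB (0, 0)).2

-- ===== PRECONDITION & SPEC =====
def Spec_f (lst : List Bool) (out : Int) : Prop := out = f_alt lst
instance (lst : List Bool) (out : Int) : Decidable (Spec_f lst out) := by unfold Spec_f; infer_instance

-- ===== CLAIM (what is proved, stated in full; the proofs are below) =====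
def Claim_equal_f : Prop := ∀ (lst : List Bool), Dom_f lst → Spec_f lst (f lst)

-- ===== LEMMAS AND PROOFS =====

-- Extending a run of length r by one element adds r+1 new all-True subarrays:
-- (r+2)*(r+1)//2 = (r+1)*r//2 + (r+1).
lemma fd_succ (r : Int) :
    PySem.Int.floordiv ((r + 2) * (r + 1)) 2 = PySem.Int.floordiv ((r + 1) * r) 2 + (r + 1) := by
  rw [show (r + 2) * (r + 1) = (r + 1) * r + (r + 1) * 2 from by ring,
      PySem.Int.floordiv_eq_ediv_of_pos (by omega),
      PySem.Int.floordiv_eq_ediv_of_pos (by omega),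
      Int.add_mul_ediv_right _ _ (by omega)]

-- Loop invariant: starting A with c = run+1 and B with run, A's final answer equals
-- B's, provided B's total is seeded with the triangular number of the current run.
lemma loop_eq (l : List Bool) : ∀ (run tot : Int),
    (let s := l.foldl stepA (run + 1, tot); s.2 + PySem.Int.floordiv (s.1 * (s.1 - 1)) 2)
      = (l.foldl stepB (run, tot + PySem.Int.floordiv ((run + 1) * run) 2)).2 := by
  induction l with
  | nil =>
      intro run tot
      simp only [List.foldl_nil]
      rw [show (run + 1) * (run + 1 - 1) = (run + 1) * run from by ring]
  | cons b l ih =>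
      intro run tot
      cases b with
      | true =>
          simp only [List.foldl_cons, stepA, stepB, reduceIte]
          have h := ih (run + 1) tot
          simp only [] at h
          have e : tot + PySem.Int.floordiv ((run + 1 + 1) * (run + 1)) 2
              = tot + PySem.Int.floordiv ((run + 1) * run) 2 + (run + 1) := by
            rw [show run + 1 + 1 = run + 2 from by ring, fd_succ]; ring
          rw [h, e]
      | false =>
          simp only [List.foldl_cons, stepA, stepB, Bool.false_eq_true, if_false, add_zero]
          have h := ih 0 (tot + PySem.Int.floordiv ((run + 1) * run) 2)
          simp only [show (0:Int) + 1 = 1 from rfl,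
            show PySem.Int.floordiv ((1:Int) * 0) 2 = 0 from by decide, add_zero] at h
          rw [show (run + 1) * (run + 1 - 1) = (run + 1) * run from by ring]
          exact h

-- ===== VERDICT (by name: the statement is the Claim_ definition above) =====
theorem f_spec : Claim_equal_f := by
  intro lst _
  unfold Spec_f f f_alt
  have h := loop_eq lst 0 0
  simp only [show (0:Int) + 1 = 1 from rfl,
    show PySem.Int.floordiv ((1:Int) * 0) 2 = 0 from by decide, add_zero] at h
  exact h
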